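-- pv_equiv track=rewrite | github.com/rOOOOOnn/MA3K7-Problem-Solving-with-Python | assignment1/assignment1.py | number_bracelet
-- ===== SOURCE A (Python) =====
-- def number_bracelet(a, b, max_steps=500):
--     if not (0 <= a < 10 and 0 <= b < 10):
--         raise ValueError("Inputs must be integers in {0,...,9}.")
--
--     seq = [a, b]
--     seen_pairs = {(a, b): 0}  # pair -> index of the first element of the pair in seq
--
--     for _ in range(max_steps):
--         seq.append((seq[-1] + seq[-2]) % 10)
--
--         pair = (seq[-2], seq[-1])
--         if pair in seen_pairs:
--             k = seen_pairs[pair]     # first time this pair appeared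
--             m = len(seq) - 2         # current index of the first element of pair
--             cycle_digits = seq[k:m]  # one full period of digits
--             cycle_pairs = [(cycle_digits[i], cycle_digits[(i+1) % len(cycle_digits)])
--                            for i in range(len(cycle_digits))]
--             return seq, cycle_digits, cycle_pairs, len(cycle_digits)
--
--         seen_pairs[pair] = len(seq) - 2
--
--     return seq, None, None, None
-- ===== SOURCE B (Python) =====
-- def number_bracelet(a, b, max_steps=500):
--     if not (0 <= a < 10 and 0 <= b < 10):
--         raise ValueError("Inputs must be integers in {0,...,9}.")
--
--     # Phase 1: find the period with two registers only (no seq, no dict).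
--     # The mod-10 Fibonacci step is a bijection on pairs, so the orbit of
--     # (a, b) is a pure cycle and the first repeated pair is (a, b) itself.
--     t = None
--     x, y = a, b
--     for i in range(max_steps):
--         x, y = y, (x + y) % 10
--         if (x, y) == (a, b):
--             t = i + 1
--             break
--
--     # Phase 2: regenerate the digit sequence of the required length.
--     steps = max_steps if t is None else t
--     seq = [a, b]
--     u, v = a, b
--     for _ in range(steps):
--         u, v = v, (u + v) % 10
--         seq.append(v)
--
--     if t is None:
--         return seq, None, None, None
--     cycle = seq[:t]
--     pairs = list(zip(cycle, cycle[1:] + cycle[:1]))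
--     return seq, cycle, pairs, t
-- ===== Notes on version B (the rewrite author's own statement) =====
-- stated objective: alternative
-- what changed: B replaces A's single seq-building loop with dict bookkeeping by a two-phase algorithm: phase 1 finds the period with two registers only (no seq, no dict; valid because the mod-10 Fibonacci step is a bijection on pairs, so the first repeated pair is the start), phase 2 regenerates the digit list of the known length, and the cycle pairs come from zip(cycle, cycle[1:]+cycle[:1]) instead of the mod-index comprehension.
import Mathlib
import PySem

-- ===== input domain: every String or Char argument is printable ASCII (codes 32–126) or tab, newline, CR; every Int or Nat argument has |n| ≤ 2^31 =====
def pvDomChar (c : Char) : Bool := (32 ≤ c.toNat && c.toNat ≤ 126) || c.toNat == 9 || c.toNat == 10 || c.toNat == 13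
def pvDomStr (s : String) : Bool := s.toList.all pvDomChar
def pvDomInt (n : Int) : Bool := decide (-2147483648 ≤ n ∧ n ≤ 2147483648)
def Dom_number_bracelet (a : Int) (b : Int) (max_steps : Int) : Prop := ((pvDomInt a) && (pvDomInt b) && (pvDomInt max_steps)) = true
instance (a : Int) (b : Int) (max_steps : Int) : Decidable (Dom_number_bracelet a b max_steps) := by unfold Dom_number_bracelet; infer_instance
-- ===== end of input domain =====

-- B is a two-phase alternative: phase 1 finds the period with two registers (no seq, no
-- dict; correct because the mod-10 Fibonacci step is a bijection on pairs, so the first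
-- repeated pair is the starting pair), phase 2 regenerates the digits, and the cycle
-- pairs come from zipping the cycle with its rotation. Objective: alternative (no speed claim).

-- ===== PORT A =====
-- the for-loop of A: fuel = remaining iterations of range(max_steps)
def nbLoopA (fuel : Nat) (seq : List Int) (seen : PySem.Dict (Int × Int) Int) :
    List Int × Option (List Int) × (Option (List (Int × Int))) × Option Int :=
  match fuel with
  | 0 => (seq, none, none, none)
  | f + 1 =>
    -- seq.append((seq[-1] + seq[-2]) % 10)
    let seq2 := seq ++ [PySem.Int.mod (PySem.List.pyGetD seq (-1) 0 + PySem.List.pyGetD seq (-2) 0) 10]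
    let pair := (PySem.List.pyGetD seq2 (-2) 0, PySem.List.pyGetD seq2 (-1) 0)
    match seen.get? pair with
    | some k =>
      let m : Int := (seq2.length : Int) - 2
      let cyc := PySem.List.slice seq2 (some k) (some m)
      let cps := (List.range cyc.length).map (fun (i : Nat) =>
        (PySem.List.pyGetD cyc (i : Int) 0,
         PySem.List.pyGetD cyc (PySem.Int.mod ((i : Int) + 1) (cyc.length : Int)) 0))
      (seq2, some cyc, some cps, some (cyc.length : Int))
    | none => nbLoopA f seq2 (seen.insert pair ((seq2.length : Int) - 2))

def number_bracelet (a : Int) (b : Int) (max_steps : Int) :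
    List Int × Option (List Int) × (Option (List (Int × Int))) × Option Int :=
  -- the a/b-range guard raises ValueError in Python: excluded by Pre_number_bracelet
  nbLoopA max_steps.toNat [a, b] (PySem.Dict.empty.insert (a, b) 0)

-- ===== PORT B =====
-- phase 1 of B: registers only; returns the absolute step index at which the pair returns to (a, b)
def nbFind (a b : Int) : Int → Int → Nat → Nat → Option Nat
  | _, _, 0, _ => none
  | x, y, f + 1, i =>
    let y2 := PySem.Int.mod (x + y) 10
    if (y, y2) = (a, b) then some (i + 1) else nbFind a b y y2 f (i + 1)

-- phase 2 of B: the digits appended after the initial [a, b], `steps` of them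
def nbTail : Int → Int → Nat → List Int
  | _, _, 0 => []
  | u, v, n + 1 =>
    let w := PySem.Int.mod (u + v) 10
    w :: nbTail v w n

def number_bracelet_alt (a : Int) (b : Int) (max_steps : Int) :
    List Int × Option (List Int) × (Option (List (Int × Int))) × Option Int :=
  let fuel := max_steps.toNat
  match nbFind a b a b fuel 0 with
  | none => (a :: b :: nbTail a b fuel, none, none, none)
  | some t =>
    let seq := a :: b :: nbTail a b t
    let cyc := seq.take t
    (seq, some cyc, some (cyc.zip (cyc.drop 1 ++ cyc.take 1)), some (t : Int))

-- ===== PRECONDITION & SPEC =====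
-- Pre_ excludes exactly the inputs on which A raises ValueError (a or b outside 0..9)
def Pre_number_bracelet (a : Int) (b : Int) (max_steps : Int) : Prop :=
  0 ≤ a ∧ a < 10 ∧ 0 ≤ b ∧ b < 10
instance (a : Int) (b : Int) (max_steps : Int) : Decidable (Pre_number_bracelet a b max_steps) := by
  unfold Pre_number_bracelet; infer_instance
def pvWitness_number_bracelet : Int × Int × Int := (3, 5, 40)

def Spec_number_bracelet (a : Int) (b : Int) (max_steps : Int)
    (out : List Int × Option (List Int) × (Option (List (Int × Int))) × Option Int) : Prop :=
  out = number_bracelet_alt a b max_steps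
instance (a : Int) (b : Int) (max_steps : Int)
    (out : List Int × Option (List Int) × (Option (List (Int × Int))) × Option Int) :
    Decidable (Spec_number_bracelet a b max_steps out) := by
  unfold Spec_number_bracelet; infer_instance

-- ===== CLAIM (what is proved, stated in full; the proofs are below) =====
def Claim_equal_number_bracelet : Prop :=
  ∀ (a : Int) (b : Int) (max_steps : Int), Dom_number_bracelet a b max_steps →
    Pre_number_bracelet a b max_steps →
    Spec_number_bracelet a b max_steps (number_bracelet a b max_steps)

-- ===== LEMMAS AND PROOFS =====

-- one step of the mod-10 Fibonacci map on pairs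
def nbStep (p : Int × Int) : Int × Int := (p.2, PySem.Int.mod (p.1 + p.2) 10)

theorem nbGetD_last (pre : List Int) (u v : Int) :
    PySem.List.pyGetD (pre ++ [u, v]) (-1) 0 = v := by
  have : pre ++ [u, v] = (pre ++ [u]) ++ [v] := by simp
  rw [this, PySem.List.pyGetD_neg_one_append_singleton]

theorem nbGetD_pen (pre : List Int) (u v : Int) :
    PySem.List.pyGetD (pre ++ [u, v]) (-2) 0 = u := by
  rw [PySem.List.pyGetD_neg_ofNat (pre ++ [u, v]) 2 0 (by omega) (by simp)]
  simp

theorem nbStep_range (a b : Int) (ha : 0 ≤ a ∧ a < 10 ∧ 0 ≤ b ∧ b < 10) (i : Nat) :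
    0 ≤ (nbStep^[i] (a, b)).1 ∧ (nbStep^[i] (a, b)).1 < 10 ∧
    0 ≤ (nbStep^[i] (a, b)).2 ∧ (nbStep^[i] (a, b)).2 < 10 := by
  induction i with
  | zero => simpa using ⟨ha.1, ha.2.1, ha.2.2.1, ha.2.2.2⟩
  | succ n ih =>
    rw [Function.iterate_succ_apply']
    refine ⟨ih.2.2.1, ih.2.2.2, ?_, ?_⟩
    · exact PySem.Int.mod_nonneg _ (by omega)
    · exact PySem.Int.mod_lt _ (by omega)

theorem nbStep_inj (p q : Int × Int)
    (hp : 0 ≤ p.1 ∧ p.1 < 10) (hq : 0 ≤ q.1 ∧ q.1 < 10)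
    (h : nbStep p = nbStep q) : p = q := by
  obtain ⟨x, y⟩ := p; obtain ⟨u, v⟩ := q
  simp only [nbStep, Prod.mk.injEq] at h
  obtain ⟨h1, h2⟩ := h
  subst h1
  rw [PySem.Int.mod_eq_emod_of_pos (by omega : (0:Int) < 10),
    PySem.Int.mod_eq_emod_of_pos (by omega : (0:Int) < 10)] at h2
  simp only [Prod.mk.injEq, and_true]
  simp only at hp hq
  omega

theorem nbTail_length (u v : Int) (n : Nat) : (nbTail u v n).length = n := by
  induction n generalizing u v with
  | zero => rfl
  | succ m ih => simp [nbTail, ih]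

-- nbTail in snoc form: one more step appends the second component of the next iterate
theorem nbTail_succ (u v : Int) (n : Nat) :
    nbTail u v (n + 1) = nbTail u v n ++ [(nbStep^[n + 1] (u, v)).2] := by
  induction n generalizing u v with
  | zero => simp [nbTail, nbStep]
  | succ m ih =>
    have hit : nbStep^[m + 1 + 1] (u, v) = nbStep^[m + 1] (nbStep (u, v)) := by
      rw [Function.iterate_succ_apply]
    calc nbTail u v (m + 1 + 1)
        = PySem.Int.mod (u + v) 10 :: nbTail v (PySem.Int.mod (u + v) 10) (m + 1) := rfl
      _ = PySem.Int.mod (u + v) 10 ::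
            (nbTail v (PySem.Int.mod (u + v) 10) m ++ [(nbStep^[m + 1] (v, PySem.Int.mod (u + v) 10)).2]) := by
          rw [ih]
      _ = nbTail u v (m + 1) ++ [(nbStep^[m + 1 + 1] (u, v)).2] := by
          rw [hit]; simp [nbTail, nbStep]

-- the last two digits of the generated sequence are the current pair
theorem nbTail_form (a b : Int) (n : Nat) :
    ∃ pre, a :: b :: nbTail a b n = pre ++ [(nbStep^[n] (a, b)).1, (nbStep^[n] (a, b)).2] := by
  induction n with
  | zero => exact ⟨[], by simp [nbTail]⟩
  | succ m ih =>
    obtain ⟨pre, hpre⟩ := ih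
    refine ⟨pre ++ [(nbStep^[m] (a, b)).1], ?_⟩
    have h1 : (nbStep^[m + 1] (a, b)).1 = (nbStep^[m] (a, b)).2 := by
      rw [Function.iterate_succ_apply']; rfl
    rw [show a :: b :: nbTail a b (m + 1) = (a :: b :: nbTail a b m) ++ [(nbStep^[m + 1] (a, b)).2] from by
      rw [nbTail_succ]; simp]
    rw [hpre, h1]
    simp

-- A's mod-index pair comprehension equals zipping with the rotation
theorem nbRot (l : List Int) (hl : l ≠ []) :
    (List.range l.length).map (fun (i : Nat) =>
      (PySem.List.pyGetD l (i : Int) 0,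
       PySem.List.pyGetD l (PySem.Int.mod ((i : Int) + 1) (l.length : Int)) 0)) =
    l.zip (l.drop 1 ++ l.take 1) := by
  have hlen : 0 < l.length := List.length_pos_iff.mpr hl
  have hstep : ∀ i ∈ List.range l.length,
      (PySem.List.pyGetD l (i : Int) 0,
       PySem.List.pyGetD l (PySem.Int.mod ((i : Int) + 1) (l.length : Int)) 0) =
      (l.getD i 0, l.getD ((i + 1) % l.length) 0) := by
    intro i _
    have hmod : PySem.Int.mod ((i : Int) + 1) (l.length : Int) =
        (((i + 1) % l.length : Nat) : Int) := by
      rw [PySem.Int.mod_eq_emod_of_pos (by exact_mod_cast hlen)]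
      push_cast
      omega
    rw [hmod, PySem.List.pyGetD_natCast, PySem.List.pyGetD_natCast]
  rw [List.map_congr_left hstep]
  apply List.ext_getElem
  · simp [Nat.min_def]
    rw [if_pos (by omega : 1 ≤ l.length)]
    omega
  · intro i h1 h2
    simp only [List.length_map, List.length_range] at h1
    have hmlt : (i + 1) % l.length < l.length := Nat.mod_lt _ hlen
    simp only [List.getElem_map, List.getElem_range, List.getElem_zip, Prod.mk.injEq]
    rw [List.getD_eq_getElem l 0 h1, List.getD_eq_getElem l 0 hmlt]
    refine ⟨rfl, ?_⟩
    rcases Nat.lt_or_ge (i + 1) l.length with hcase | hcase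
    · simp only [Nat.mod_eq_of_lt hcase]
      rw [List.getElem_append_left (by simp; omega)]
      simp only [List.getElem_drop]
      congr 1
      omega
    · have h0 : (i + 1) % l.length = 0 := by
        have hi1 : i + 1 = l.length := by omega
        simp [hi1]
      simp only [h0]
      rw [List.getElem_append_right (by simp; omega)]
      simp only [List.getElem_take, List.length_drop]
      congr 1
      omega

-- main loop equivalence: A's loop from step n equals B's two-phase result
theorem nbLoop_eq (a b : Int) (ha : 0 ≤ a ∧ a < 10 ∧ 0 ≤ b ∧ b < 10) (fuel : Nat) :
    ∀ (n : Nat) (seen : PySem.Dict (Int × Int) Int),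
      (∀ p, (seen.get? p).isSome ↔ p ∈ (List.range (n + 1)).map (fun i => nbStep^[i] (a, b))) →
      ((List.range (n + 1)).map (fun i => nbStep^[i] (a, b))).Nodup →
      seen.get? (a, b) = some 0 →
      nbLoopA fuel (a :: b :: nbTail a b n) seen =
        match nbFind a b (nbStep^[n] (a, b)).1 (nbStep^[n] (a, b)).2 fuel n with
        | none => (a :: b :: nbTail a b (n + fuel), none, none, none)
        | some t =>
          (a :: b :: nbTail a b t,
           some ((a :: b :: nbTail a b t).take t),
           some (((a :: b :: nbTail a b t).take t).zip
             (((a :: b :: nbTail a b t).take t).drop 1 ++ ((a :: b :: nbTail a b t).take t).take 1)),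
           some ((t : Nat) : Int)) := by
  induction fuel with
  | zero =>
    intro n seen _ _ _
    simp [nbLoopA, nbFind]
  | succ f ih =>
    intro n seen hmem hnd hab
    obtain ⟨pre, hform⟩ := nbTail_form a b n
    set x := (nbStep^[n] (a, b)).1 with hx
    set y := (nbStep^[n] (a, b)).2 with hy
    set c : Int := PySem.Int.mod (x + y) 10 with hc
    have hstep1 : nbStep^[n + 1] (a, b) = (y, c) := by
      rw [Function.iterate_succ_apply', hc, hx, hy]; rfl
    -- the appended digit and the new pair, read through A's negative indices
    have hlast : PySem.List.pyGetD (a :: b :: nbTail a b n) (-1) 0 = y := by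
      rw [hform]; exact nbGetD_last pre x y
    have hpen : PySem.List.pyGetD (a :: b :: nbTail a b n) (-2) 0 = x := by
      rw [hform]; exact nbGetD_pen pre x y
    have hseq2 : (a :: b :: nbTail a b n) ++ [c] = a :: b :: nbTail a b (n + 1) := by
      rw [nbTail_succ, hstep1]; simp
    have hsplit : (a :: b :: nbTail a b n) ++ [c] = (pre ++ [x]) ++ [y, c] := by
      rw [hform]; simp
    have hlast2 : PySem.List.pyGetD ((a :: b :: nbTail a b n) ++ [c]) (-1) 0 = c := by
      rw [hsplit]; exact nbGetD_last (pre ++ [x]) y c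
    have hpen2 : PySem.List.pyGetD ((a :: b :: nbTail a b n) ++ [c]) (-2) 0 = y := by
      rw [hsplit]; exact nbGetD_pen (pre ++ [x]) y c
    -- the new pair repeats iff it is the starting pair
    have hmem_iff : (y, c) ∈ (List.range (n + 1)).map (fun i => nbStep^[i] (a, b)) ↔
        (y, c) = (a, b) := by
      constructor
      · intro hin
        obtain ⟨j, hj, hfe⟩ := List.mem_map.mp hin
        have hjn : j < n + 1 := List.mem_range.mp hj
        rcases Nat.eq_zero_or_pos j with hj0 | hjpos
        · subst hj0; simpa using hfe.symm
        · exfalso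
          obtain ⟨i, rfl⟩ : ∃ i, j = i + 1 := ⟨j - 1, by omega⟩
          have h1 : nbStep (nbStep^[i] (a, b)) = nbStep (nbStep^[n] (a, b)) := by
            rw [← Function.iterate_succ_apply' nbStep i (a, b),
              ← Function.iterate_succ_apply' nbStep n (a, b)]
            rw [show i.succ = i + 1 from rfl, hfe, show n.succ = n + 1 from rfl, hstep1]
          have heq : nbStep^[i] (a, b) = nbStep^[n] (a, b) :=
            nbStep_inj _ _ ⟨(nbStep_range a b ha i).1, (nbStep_range a b ha i).2.1⟩
              ⟨(nbStep_range a b ha n).1, (nbStep_range a b ha n).2.1⟩ h1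
          have hne : i ≠ n := by omega
          have h2 : ((List.range (n + 1)).map (fun i => nbStep^[i] (a, b)))[i]'(by
              simp only [List.length_map, List.length_range]; omega) =
              ((List.range (n + 1)).map (fun i => nbStep^[i] (a, b)))[n]'(by
              simp only [List.length_map, List.length_range]; omega) := by
            simp only [List.getElem_map, List.getElem_range]
            exact heq
          exact hne ((List.Nodup.getElem_inj_iff hnd).mp h2)
      · intro h
        exact List.mem_map.mpr ⟨0, List.mem_range.mpr (by omega), by simpa using h.symm⟩
    -- unfold one step of both loops
    have hcomm : PySem.Int.mod (y + x) 10 = c := by rw [hc, Int.add_comm]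
    by_cases hcase : (y, c) = (a, b)
    · -- cycle closes: A hits its seen-pair branch, B's nbFind returns n + 1
      have hget : seen.get? (y, c) = some 0 := by rw [hcase]; exact hab
      have hfind : nbFind a b x y (f + 1) n = some (n + 1) := by
        simp only [nbFind, ← hc]
        exact if_pos hcase
      rw [hfind]
      simp only [nbLoopA, hlast, hpen, hcomm, hlast2, hpen2, hget]
      have hlen2 : ((a :: b :: nbTail a b n) ++ [c]).length = n + 3 := by
        simp [nbTail_length]
      have hbound : (((a :: b :: nbTail a b n) ++ [c]).length : Int) - 2 =
          ((n + 1 : Nat) : Int) := by rw [hlen2]; push_cast; omega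
      rw [hbound, PySem.List.slice_zero_start, PySem.List.slice_to_natCast, hseq2]
      set L := (a :: b :: nbTail a b (n + 1)).take (n + 1) with hL
      have htklen : L.length = n + 1 := by rw [hL]; simp [nbTail_length]; omega
      have htkne : L ≠ [] := by intro h; rw [h] at htklen; simp at htklen
      rw [nbRot L htkne, htklen]
    · -- no cycle yet: both loops recurse
      have hnotin : (y, c) ∉ (List.range (n + 1)).map (fun i => nbStep^[i] (a, b)) :=
        fun h => hcase (hmem_iff.mp h)
      have hnone : seen.get? (y, c) = none := by
        cases h : seen.get? (y, c) with
        | none => rfl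
        | some v => exact absurd ((hmem (y, c)).mp (by simp [h])) hnotin
      have hfind : nbFind a b x y (f + 1) n = nbFind a b y c f (n + 1) := by
        simp only [nbFind, ← hc]
        exact if_neg hcase
      rw [hfind]
      simp only [nbLoopA, hlast, hpen, hcomm, hlast2, hpen2, hnone]
      rw [hseq2]
      have horb2 : (List.range (n + 1 + 1)).map (fun i => nbStep^[i] (a, b)) =
          (List.range (n + 1)).map (fun i => nbStep^[i] (a, b)) ++ [(y, c)] := by
        rw [List.range_succ, List.map_append]
        simp [hstep1]
      have hrec := ih (n + 1)
        (seen.insert (y, c) (((a :: b :: nbTail a b (n + 1)).length : Int) - 2))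
        (by
          intro p
          rw [horb2]
          rcases eq_or_ne p (y, c) with rfl | hne
          · simp [PySem.Dict.get?_insert_self]
          · rw [PySem.Dict.get?_insert_of_ne seen _ hne]
            simp [hmem p, hne])
        (by
          rw [horb2]
          exact List.Nodup.append hnd (List.nodup_singleton _) (by
            intro u hu hv
            simp only [List.mem_singleton] at hv
            subst hv
            exact hnotin hu))
        (by
          rw [PySem.Dict.get?_insert_of_ne seen _ (fun h => hcase h.symm)]
          exact hab)
      rw [show (nbStep^[n + 1] (a, b)).1 = y from by rw [hstep1],
        show (nbStep^[n + 1] (a, b)).2 = c from by rw [hstep1],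
        show n + 1 + f = n + (f + 1) from by omega] at hrec
      exact hrec

-- ===== VERDICT (by name: the statement is the Claim_ definition above) =====
theorem number_bracelet_spec : Claim_equal_number_bracelet := by
  intro a b max_steps _ hpre
  unfold Spec_number_bracelet number_bracelet number_bracelet_alt
  obtain ⟨h1, h2, h3, h4⟩ := hpre
  have key := nbLoop_eq a b ⟨h1, h2, h3, h4⟩ max_steps.toNat 0
    (PySem.Dict.empty.insert (a, b) 0)
    (by
      intro p
      rcases eq_or_ne p (a, b) with rfl | hne
      · simp [PySem.Dict.get?_insert_self]
      · rw [PySem.Dict.get?_insert_of_ne _ _ hne]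
        simp [PySem.Dict.get?_empty, hne])
    (by simp)
    (PySem.Dict.get?_insert_self _ _ _)
  simp only [nbTail, Function.iterate_zero, id_eq] at key
  rw [key]
  simp
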